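-- pv_equiv track=rewrite | github.com/mhuh22/Python-workspace | Personal_Projects/Lettergames/password_security_demo.py | charsets_used
-- ===== SOURCE A (Python) =====
-- def charsets_used(pw: str):
--     sets = {
--         "lower": any(c.islower() for c in pw),
--         "upper": any(c.isupper() for c in pw),
--         "digits": any(c.isdigit() for c in pw),
--         "symbols": any((not c.isalnum()) for c in pw),
--     }
--     return sets
-- ===== SOURCE B (Python) =====
-- def charsets_used(pw: str):
--     lower = upper = digits = symbols = False
--     for c in pw:
--         if c.islower():
--             lower = True
--         if c.isupper():
--             upper = True
--         if c.isdigit():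
--             digits = True
--         if not c.isalnum():
--             symbols = True
--     return {"lower": lower, "upper": upper, "digits": digits, "symbols": symbols}
-- ===== Notes on version B (the rewrite author's own statement) =====
-- stated objective: faster
-- what changed: Replaces four separate short-circuiting any() generator scans of the password with a single explicit pass maintaining four boolean accumulators.
import Mathlib
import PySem

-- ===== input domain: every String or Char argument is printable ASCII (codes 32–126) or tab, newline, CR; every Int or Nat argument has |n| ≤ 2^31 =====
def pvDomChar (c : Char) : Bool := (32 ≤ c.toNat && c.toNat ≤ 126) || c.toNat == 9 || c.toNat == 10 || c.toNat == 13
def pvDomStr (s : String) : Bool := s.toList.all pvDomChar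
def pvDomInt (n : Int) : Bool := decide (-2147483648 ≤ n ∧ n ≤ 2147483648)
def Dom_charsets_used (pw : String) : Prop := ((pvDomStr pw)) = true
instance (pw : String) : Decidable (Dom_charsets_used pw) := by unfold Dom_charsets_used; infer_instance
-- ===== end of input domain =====

-- B replaces A's four separate any() scans with one pass maintaining four boolean flags (objective: alternative decomposition).

-- ===== PORT A =====
def charsets_used (pw : String) : List (String × Bool) :=
  [("lower", pw.toList.any PySem.Chars.islower),
   ("upper", pw.toList.any PySem.Chars.isupper),
   ("digits", pw.toList.any PySem.Chars.isdigit),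
   ("symbols", pw.toList.any (fun c => !PySem.Chars.isalnum c))]

def pvStep (acc : Bool × Bool × Bool × Bool) (c : Char) : Bool × Bool × Bool × Bool :=
  let acc := if PySem.Chars.islower c then (true, acc.2) else acc
  let acc := if PySem.Chars.isupper c then (acc.1, true, acc.2.2) else acc
  let acc := if PySem.Chars.isdigit c then (acc.1, acc.2.1, true, acc.2.2.2) else acc
  let acc := if !PySem.Chars.isalnum c then (acc.1, acc.2.1, acc.2.2.1, true) else acc
  acc

-- ===== PORT B =====
def charsets_used_alt (pw : String) : List (String × Bool) :=
  let st := pw.toList.foldl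
    pvStep (false, false, false, false)
  [("lower", st.1), ("upper", st.2.1), ("digits", st.2.2.1), ("symbols", st.2.2.2)]

-- ===== PRECONDITION & SPEC =====
def Spec_charsets_used (pw : String) (out : List (String × Bool)) : Prop := out = charsets_used_alt pw
instance (pw : String) (out : List (String × Bool)) : Decidable (Spec_charsets_used pw out) := by unfold Spec_charsets_used; infer_instance

-- ===== CLAIM (what is proved, stated in full; the proofs are below) =====
def Claim_equal_charsets_used : Prop := ∀ (pw : String), Dom_charsets_used pw → Spec_charsets_used pw (charsets_used pw)

-- ===== LEMMAS AND PROOFS =====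
theorem charsets_fold_eq (cs : List Char) (l u d s : Bool) :
    cs.foldl
      pvStep (l, u, d, s)
    = (l || cs.any PySem.Chars.islower,
       u || cs.any PySem.Chars.isupper,
       d || cs.any PySem.Chars.isdigit,
       s || cs.any (fun c => !PySem.Chars.isalnum c)) := by
  induction cs generalizing l u d s with
  | nil => simp
  | cons c cs ih =>
    simp only [List.foldl_cons, List.any_cons, pvStep]
    split_ifs <;> rw [ih] <;> simp_all [Bool.or_assoc]

-- ===== VERDICT (by name: the statement is the Claim_ definition above) =====
theorem charsets_used_spec : Claim_equal_charsets_used := by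
  intro pw _
  show _ = _
  simp [charsets_used, charsets_used_alt, charsets_fold_eq]
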